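-- pv_equiv track=rewrite | github.com/doramirdor/getnadir.dev | backend/app/services/enhanced_litellm_router.py | _get_content_policy_fallbacks
-- ===== SOURCE A (Python) =====
-- from typing import Dict, Any, List, Optional, Union, AsyncGenerator, Tuple
--
-- def _get_content_policy_fallbacks(model_name: str, available_models: List[str]) -> List[str]:
--     """Get fallback models for content policy restrictions."""
--     # Define content policy strictness (lower = more permissive)
--     policy_strictness = {
--         "gpt-4o-mini": 3,
--         "gpt-4o": 3,
--         "gpt-4": 3,
--         "gpt-3.5-turbo": 3,
--         "claude-3-haiku-20240307": 2,
--         "claude-3-sonnet-20240229": 2,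
--         "claude-3-opus-20240229": 1,  # Most permissive
--         "gemini-1.5-flash": 4,  # More strict
--         "gemini-1.5-pro": 4,
--         "gemini-1.0-pro": 4
--     }
--
--     model_strictness = policy_strictness.get(model_name, 3)
--
--     # Find less strict models
--     fallbacks = []
--     for other_model in available_models:
--         if other_model == model_name:
--             continue
--         other_strictness = policy_strictness.get(other_model, 3)
--         if other_strictness < model_strictness:
--             fallbacks.append(other_model)
--
--     # Sort by strictness (ascending - less strict first)
--     fallbacks.sort(key=lambda m: policy_strictness.get(m, 3))
--
--     return fallbacks[:2]
-- ===== SOURCE B (Python) =====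
-- from typing import List
--
-- # Policy represented as membership tiers; every model not listed has the default strictness 3,
-- # so the four default (level-3) models need not appear at all.
-- _MOST_PERMISSIVE = ["claude-3-opus-20240229"]                           # strictness 1
-- _PERMISSIVE = ["claude-3-haiku-20240307", "claude-3-sonnet-20240229"]   # strictness 2
-- _STRICTEST = ["gemini-1.5-flash", "gemini-1.5-pro", "gemini-1.0-pro"]   # strictness 4
--
-- def _strictness(model: str) -> int:
--     if model in _MOST_PERMISSIVE:
--         return 1
--     if model in _PERMISSIVE:
--         return 2
--     if model in _STRICTEST:
--         return 4
--     return 3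
--
-- def _get_content_policy_fallbacks(model_name: str, available_models: List[str]) -> List[str]:
--     """Get fallback models for content policy restrictions (bucketed selection)."""
--     ms = _strictness(model_name)
--     picked = [m
--               for level in range(1, ms)
--               for m in available_models
--               if m != model_name and _strictness(m) == level]
--     return picked[:2]
-- ===== Notes on version B (the rewrite author's own statement) =====
-- stated objective: simpler
-- what changed: Replaces A's dict lookup plus filter-then-stable-sort with a membership-tier strictness function and a bucketed scan over the strictness levels below the model's own, collecting per level in list order and returning the first two.
import Mathlib
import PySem

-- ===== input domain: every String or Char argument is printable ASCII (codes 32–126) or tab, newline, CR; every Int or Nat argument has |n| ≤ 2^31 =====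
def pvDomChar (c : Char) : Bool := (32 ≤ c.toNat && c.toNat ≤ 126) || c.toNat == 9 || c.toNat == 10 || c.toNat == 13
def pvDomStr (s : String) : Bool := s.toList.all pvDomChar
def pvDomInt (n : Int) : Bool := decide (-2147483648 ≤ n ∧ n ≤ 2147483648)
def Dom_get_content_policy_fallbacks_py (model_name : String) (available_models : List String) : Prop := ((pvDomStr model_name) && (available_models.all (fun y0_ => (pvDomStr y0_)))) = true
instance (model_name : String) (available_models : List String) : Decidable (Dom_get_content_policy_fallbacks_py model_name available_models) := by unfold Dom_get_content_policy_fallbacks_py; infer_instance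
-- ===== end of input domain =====

-- B replaces A's dict lookup + filter-then-stable-sort by a membership-tier strictness function and
-- a bucketed scan over the strictness levels below the model's own (objective: simpler).

-- ===== PORT A =====
def pvPolicyA : PySem.Dict String Int := PySem.Dict.mk
  [("gpt-4o-mini",3),("gpt-4o",3),("gpt-4",3),("gpt-3.5-turbo",3),
   ("claude-3-haiku-20240307",2),("claude-3-sonnet-20240229",2),("claude-3-opus-20240229",1),
   ("gemini-1.5-flash",4),("gemini-1.5-pro",4),("gemini-1.0-pro",4)]

-- policy_strictness.get(m, 3)
def pvStrictA (m : String) : Int := PySem.Dict.getD pvPolicyA m 3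

def get_content_policy_fallbacks_py (model_name : String) (available_models : List String) : List String :=
  let model_strictness := pvStrictA model_name
  let fallbacks : List String := available_models.foldl
    (fun acc other_model =>
      if other_model == model_name then acc
      else
        let other_strictness := pvStrictA other_model
        if other_strictness < model_strictness then acc ++ [other_model] else acc) []
  let fallbacks := PySem.List.sorted fallbacks (fun m => pvStrictA m) false
  PySem.List.slice fallbacks none (some 2)

-- ===== PORT B =====
-- membership tiers; any model not listed defaults to strictness 3
def pvMostPermissive : List String := ["claude-3-opus-20240229"]
def pvPermissive : List String := ["claude-3-haiku-20240307", "claude-3-sonnet-20240229"]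
def pvStrictest : List String := ["gemini-1.5-flash", "gemini-1.5-pro", "gemini-1.0-pro"]

def pvStrictness (model : String) : Int :=
  if pvMostPermissive.contains model then 1
  else if pvPermissive.contains model then 2
  else if pvStrictest.contains model then 4
  else 3

def get_content_policy_fallbacks_py_alt (model_name : String) (available_models : List String) : List String :=
  let ms := pvStrictness model_name
  let picked := (PySem.List.pyRange 1 ms 1).flatMap
    (fun level => available_models.filter
      (fun m => (!(m == model_name)) && (pvStrictness m == level)))
  PySem.List.slice picked none (some 2)

-- ===== PRECONDITION & SPEC =====
def Spec_get_content_policy_fallbacks_py (model_name : String) (available_models : List String) (out : List String) : Prop := out = get_content_policy_fallbacks_py_alt model_name available_models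
instance (model_name : String) (available_models : List String) (out : List String) : Decidable (Spec_get_content_policy_fallbacks_py model_name available_models out) := by unfold Spec_get_content_policy_fallbacks_py; infer_instance

-- ===== CLAIM =====
def Claim_equal_get_content_policy_fallbacks_py : Prop := ∀ (model_name : String) (available_models : List String), Dom_get_content_policy_fallbacks_py model_name available_models → Spec_get_content_policy_fallbacks_py model_name available_models (get_content_policy_fallbacks_py model_name available_models)

-- ===== LEMMAS AND PROOFS =====

-- B's tier function computes the same strictness as A's dict lookup
theorem pvStrict_eq (m : String) : pvStrictness m = pvStrictA m := by
  by_cases h1 : m = "gpt-4o-mini"; · subst h1; decide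
  by_cases h2 : m = "gpt-4o"; · subst h2; decide
  by_cases h3 : m = "gpt-4"; · subst h3; decide
  by_cases h4 : m = "gpt-3.5-turbo"; · subst h4; decide
  by_cases h5 : m = "claude-3-haiku-20240307"; · subst h5; decide
  by_cases h6 : m = "claude-3-sonnet-20240229"; · subst h6; decide
  by_cases h7 : m = "claude-3-opus-20240229"; · subst h7; decide
  by_cases h8 : m = "gemini-1.5-flash"; · subst h8; decide
  by_cases h9 : m = "gemini-1.5-pro"; · subst h9; decide
  by_cases h10 : m = "gemini-1.0-pro"; · subst h10; decide
  have b1 : ("gpt-4o-mini" == m) = false := by simp [Ne.symm h1]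
  have b2 : ("gpt-4o" == m) = false := by simp [Ne.symm h2]
  have b3 : ("gpt-4" == m) = false := by simp [Ne.symm h3]
  have b4 : ("gpt-3.5-turbo" == m) = false := by simp [Ne.symm h4]
  have b5 : ("claude-3-haiku-20240307" == m) = false := by simp [Ne.symm h5]
  have b6 : ("claude-3-sonnet-20240229" == m) = false := by simp [Ne.symm h6]
  have b7 : ("claude-3-opus-20240229" == m) = false := by simp [Ne.symm h7]
  have b8 : ("gemini-1.5-flash" == m) = false := by simp [Ne.symm h8]
  have b9 : ("gemini-1.5-pro" == m) = false := by simp [Ne.symm h9]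
  have b10 : ("gemini-1.0-pro" == m) = false := by simp [Ne.symm h10]
  simp [pvStrictness, pvMostPermissive, pvPermissive, pvStrictest,
    pvStrictA, pvPolicyA, PySem.Dict.getD, PySem.Dict.get?, List.find?,
    b1, b2, b3, b4, b5, b6, b7, b8, b9, b10, h5, h6, h7, h8, h9, h10]

theorem strict_cases (m : String) :
    pvStrictA m = 1 ∨ pvStrictA m = 2 ∨ pvStrictA m = 3 ∨ pvStrictA m = 4 := by
  simp only [pvStrictA, pvPolicyA, PySem.Dict.getD, PySem.Dict.get?_mk_cons]
  repeat' split
  all_goals simp [PySem.Dict.get?]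

-- the insertion-sort "before" relation of A's sort
def pvBefore (a b : String) : Bool := decide (pvStrictA a < pvStrictA b)

theorem insertBy_skip (x : String) (l r : List String)
    (h : ∀ y ∈ l, pvBefore x y = false) :
    PySem.List.insertBy pvBefore x (l ++ r) = l ++ PySem.List.insertBy pvBefore x r := by
  induction l with
  | nil => simp
  | cons a t ih =>
    have ha := h a (by simp)
    simp only [List.cons_append, PySem.List.insertBy, ha]
    simp [ih (fun y hy => h y (by simp [hy]))]

theorem insertBy_last (x : String) (l : List String)
    (h : ∀ y ∈ l, pvBefore x y = false) :
    PySem.List.insertBy pvBefore x l = l ++ [x] := by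
  induction l with
  | nil => rfl
  | cons a t ih => simp [PySem.List.insertBy, h a (by simp), ih (fun y hy => h y (by simp [hy]))]

theorem insertBy_front (x : String) (r : List String)
    (h : ∀ y ∈ r, pvBefore x y = true) :
    PySem.List.insertBy pvBefore x r = x :: r := by
  cases r with
  | nil => rfl
  | cons a t => simp [PySem.List.insertBy, h a (by simp)]

theorem bucket (l : List String) :
    PySem.List.sorted l (fun m => pvStrictA m) false =
      (l.filter fun y => pvStrictA y == 1) ++ (l.filter fun y => pvStrictA y == 2) ++
      (l.filter fun y => pvStrictA y == 3) ++ (l.filter fun y => pvStrictA y == 4) := by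
  induction l using List.reverseRecOn with
  | nil => simp [PySem.List.sorted]
  | append_singleton l x ih =>
    have hsort : PySem.List.sorted (l ++ [x]) (fun m => pvStrictA m) false
        = PySem.List.insertBy pvBefore x (PySem.List.sorted l (fun m => pvStrictA m) false) := by
      rw [PySem.List.sorted_eq_foldl_insertBy, PySem.List.sorted_eq_foldl_insertBy,
        List.foldl_append]
      rfl
    have hf : ∀ (i : Int) (y : String), y ∈ (l.filter fun y => pvStrictA y == i) → pvStrictA y = i := by
      intro i y hy
      have := (List.mem_filter.mp hy).2
      simpa using this
    rw [hsort, ih]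
    have hx := strict_cases x
    rcases hx with hx | hx | hx | hx <;>
      simp only [List.filter_append, List.filter_cons, List.filter_nil, hx] <;> norm_num
    · -- strict x = 1 : x goes at the end of bucket 1
      rw [insertBy_skip x _ _ (by intro y hy; have := hf 1 y hy; simp [pvBefore, this, hx])]
      rw [insertBy_front x _ (by
        intro y hy
        simp only [List.mem_append] at hy
        rcases hy with hy | hy | hy
        · have := hf 2 y hy; simp [pvBefore, this, hx]
        · have := hf 3 y hy; simp [pvBefore, this, hx]
        · have := hf 4 y hy; simp [pvBefore, this, hx])]
    · -- strict x = 2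
      rw [insertBy_skip x _ _ (by intro y hy; have := hf 1 y hy; simp [pvBefore, this, hx])]
      rw [insertBy_skip x _ _ (by intro y hy; have := hf 2 y hy; simp [pvBefore, this, hx])]
      rw [insertBy_front x _ (by
        intro y hy
        simp only [List.mem_append] at hy
        rcases hy with hy | hy
        · have := hf 3 y hy; simp [pvBefore, this, hx]
        · have := hf 4 y hy; simp [pvBefore, this, hx])]
    · -- strict x = 3
      rw [insertBy_skip x _ _ (by intro y hy; have := hf 1 y hy; simp [pvBefore, this, hx])]
      rw [insertBy_skip x _ _ (by intro y hy; have := hf 2 y hy; simp [pvBefore, this, hx])]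
      rw [insertBy_skip x _ _ (by intro y hy; have := hf 3 y hy; simp [pvBefore, this, hx])]
      rw [insertBy_front x _ (by intro y hy; have := hf 4 y hy; simp [pvBefore, this, hx])]
    · -- strict x = 4
      rw [insertBy_skip x _ _ (by intro y hy; have := hf 1 y hy; simp [pvBefore, this, hx])]
      rw [insertBy_skip x _ _ (by intro y hy; have := hf 2 y hy; simp [pvBefore, this, hx])]
      rw [insertBy_skip x _ _ (by intro y hy; have := hf 3 y hy; simp [pvBefore, this, hx])]
      rw [insertBy_last x _ (by intro y hy; have := hf 4 y hy; simp [pvBefore, this, hx])]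

theorem loopA (model_name : String) (ms : Int) (l : List String) (acc : List String) :
    l.foldl (fun acc other =>
        if other == model_name then acc
        else if pvStrictA other < ms then acc ++ [other] else acc) acc
      = acc ++ l.filter (fun m => (!(m == model_name)) && decide (pvStrictA m < ms)) := by
  induction l generalizing acc with
  | nil => simp
  | cons a t ih =>
    by_cases ha : (a == model_name) = true
    · rw [List.foldl_cons, if_pos ha, ih]
      simp [ha]
    · by_cases hs : pvStrictA a < ms
      · rw [List.foldl_cons, if_neg ha, if_pos hs, ih]
        simp [ha, hs]
      · rw [List.foldl_cons, if_neg ha, if_neg hs, ih]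
        simp [ha, hs]

-- ===== VERDICT =====
theorem get_content_policy_fallbacks_py_spec : Claim_equal_get_content_policy_fallbacks_py := by
  intro model_name available_models _
  unfold Spec_get_content_policy_fallbacks_py
  unfold get_content_policy_fallbacks_py get_content_policy_fallbacks_py_alt
  simp only [loopA, List.nil_append, bucket, funext (fun m => pvStrict_eq m)]
  congr 1
  rcases strict_cases model_name with h | h | h | h <;> rw [h]
  · rw [show PySem.List.pyRange 1 1 1 = [] from by decide]
    simp only [List.flatMap_nil]
    have : available_models.filter
        (fun m => (!(m == model_name)) && decide (pvStrictA m < 1)) = [] := by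
      apply List.filter_eq_nil_iff.mpr
      intro m _
      rcases strict_cases m with hm | hm | hm | hm <;> simp [hm]
    rw [this]; simp
  · rw [show PySem.List.pyRange 1 2 1 = [1] from by decide]
    rw [List.filter_filter, List.filter_filter, List.filter_filter, List.filter_filter]
    simp only [List.flatMap_cons, List.flatMap_nil, List.append_nil]
    rw [List.filter_congr (l := available_models)
        (q := fun m => (!(m == model_name)) && (pvStrictA m == 1)) (by
      intro m _; rcases strict_cases m with hm | hm | hm | hm <;> simp [hm])]
    have h2 : ∀ i : Int, (2:Int) ≤ i → available_models.filter
        (fun m => (pvStrictA m == i) && ((!(m == model_name)) && decide (pvStrictA m < 2))) = [] := by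
      intro i hi
      apply List.filter_eq_nil_iff.mpr
      intro m _
      rcases strict_cases m with hm | hm | hm | hm <;> simp [hm] <;> omega
    rw [h2 2 (by norm_num), h2 3 (by norm_num), h2 4 (by norm_num)]
    simp
  · rw [show PySem.List.pyRange 1 3 1 = [1, 2] from by decide]
    rw [List.filter_filter, List.filter_filter, List.filter_filter, List.filter_filter]
    simp only [List.flatMap_cons, List.flatMap_nil, List.append_nil]
    rw [List.filter_congr (l := available_models)
        (q := fun m => (!(m == model_name)) && (pvStrictA m == 1)) (by
      intro m _; rcases strict_cases m with hm | hm | hm | hm <;> simp [hm]),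
      List.filter_congr (l := available_models) (p := fun m => (pvStrictA m == 2) && ((!(m == model_name)) && decide (pvStrictA m < 3)))
        (q := fun m => (!(m == model_name)) && (pvStrictA m == 2)) (by
      intro m _; rcases strict_cases m with hm | hm | hm | hm <;> simp [hm])]
    have h3 : ∀ i : Int, (3:Int) ≤ i → available_models.filter
        (fun m => (pvStrictA m == i) && ((!(m == model_name)) && decide (pvStrictA m < 3))) = [] := by
      intro i hi
      apply List.filter_eq_nil_iff.mpr
      intro m _
      rcases strict_cases m with hm | hm | hm | hm <;> simp [hm] <;> omega
    rw [h3 3 (by norm_num), h3 4 (by norm_num)]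
    simp
  · rw [show PySem.List.pyRange 1 4 1 = [1, 2, 3] from by decide]
    rw [List.filter_filter, List.filter_filter, List.filter_filter, List.filter_filter]
    simp only [List.flatMap_cons, List.flatMap_nil, List.append_nil]
    rw [List.filter_congr (l := available_models)
        (q := fun m => (!(m == model_name)) && (pvStrictA m == 1)) (by
      intro m _; rcases strict_cases m with hm | hm | hm | hm <;> simp [hm]),
      List.filter_congr (l := available_models) (p := fun m => (pvStrictA m == 2) && ((!(m == model_name)) && decide (pvStrictA m < 4)))
        (q := fun m => (!(m == model_name)) && (pvStrictA m == 2)) (by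
      intro m _; rcases strict_cases m with hm | hm | hm | hm <;> simp [hm]),
      List.filter_congr (l := available_models) (p := fun m => (pvStrictA m == 3) && ((!(m == model_name)) && decide (pvStrictA m < 4)))
        (q := fun m => (!(m == model_name)) && (pvStrictA m == 3)) (by
      intro m _; rcases strict_cases m with hm | hm | hm | hm <;> simp [hm])]
    have h4 : available_models.filter
        (fun m => (pvStrictA m == 4) && ((!(m == model_name)) && decide (pvStrictA m < 4))) = [] := by
      apply List.filter_eq_nil_iff.mpr
      intro m _
      rcases strict_cases m with hm | hm | hm | hm <;> simp [hm]
    rw [h4]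
    simp
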